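-- pv_equiv track=rewrite | github.com/ASSERT-KTH/Mokav | experiments/pynguin/c4b/single-return/generated_tests/src_1102/1/src_1102.py | func
-- ===== SOURCE A (Python) =====
-- def func(*args):
--
-- 	s = str(args[0])
-- 	list1 = ['A', 'E', 'I', 'O', 'U', 'Y']
-- 	list2 = [0]
-- 	for i in range(len(s)):
-- 	    if (s[i] in list1):
-- 	        list2.append((i + 1))
-- 	m = 0
-- 	list2.append((len(s) + 1))
-- 	for i in range((len(list2) - 1)):
-- 	    if ((list2[(i + 1)] - list2[i]) > m):
-- 	        m = (list2[(i + 1)] - list2[i])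
-- 	return(m)
-- ===== SOURCE B (Python) =====
-- def func(*args):
--     # One streaming pass with scalar state (prev, m) instead of building a
--     # position list and re-scanning it.
--     s = str(args[0])
--     vowels = "AEIOUY"
--     prev = 0
--     m = 0
--     for i, c in enumerate(s):
--         if c in vowels:
--             gap = (i + 1) - prev
--             if gap > m:
--                 m = gap
--             prev = i + 1
--     gap = (len(s) + 1) - prev
--     if gap > m:
--         m = gap
--     return m
-- ===== Notes on version B (the rewrite author's own statement) =====
-- stated objective: simpler
-- what changed: Replaces the two-phase algorithm (materialize the list of vowel positions with sentinels, then a second indexed loop over adjacent pairs) by a single streaming pass keeping only two scalars (previous boundary, running max).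
import Mathlib
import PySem

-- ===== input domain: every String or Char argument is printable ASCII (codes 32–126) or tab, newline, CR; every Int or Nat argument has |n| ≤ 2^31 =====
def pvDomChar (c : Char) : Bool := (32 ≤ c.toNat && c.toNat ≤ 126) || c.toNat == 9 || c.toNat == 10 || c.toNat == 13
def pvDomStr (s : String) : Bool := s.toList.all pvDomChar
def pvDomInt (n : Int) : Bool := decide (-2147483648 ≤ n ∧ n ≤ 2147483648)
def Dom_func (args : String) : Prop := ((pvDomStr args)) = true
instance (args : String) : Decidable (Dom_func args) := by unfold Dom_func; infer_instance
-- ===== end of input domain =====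

-- B replaces A's two-phase algorithm (materialize the vowel-position list, then re-scan it by index)
-- with a single streaming pass keeping two scalars; same return value (objective: simpler).

-- ===== PORT A =====
-- The Python string s is ported as its character list; s[i] is PySem.List.pyGetD (index always in range here).
def func (args : String) : Int :=
  let s := args.toList
  let list1 : List Char := ['A', 'E', 'I', 'O', 'U', 'Y']
  let list2 : List Int := (PySem.List.pyRange 0 (s.length : Int) 1).foldl
      (fun acc i => if PySem.List.pyGetD s i ' ' ∈ list1 then acc ++ [i + 1] else acc) [0]
  let list2 := list2 ++ [(s.length : Int) + 1]
  (PySem.List.pyRange 0 ((list2.length : Int) - 1) 1).foldl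
      (fun m i =>
        if PySem.List.pyGetD list2 (i + 1) 0 - PySem.List.pyGetD list2 i 0 > m then
          PySem.List.pyGetD list2 (i + 1) 0 - PySem.List.pyGetD list2 i 0
        else m) 0

-- ===== PORT B =====
def func_alt (args : String) : Int :=
  let s := args.toList
  let vowels : List Char := ['A', 'E', 'I', 'O', 'U', 'Y']
  let r := (PySem.List.enumerate s 0).foldl
      (fun (st : Int × Int) p =>
        if p.2 ∈ vowels then
          let gap := p.1 + 1 - st.1
          (p.1 + 1, if gap > st.2 then gap else st.2)
        else st) (0, 0)
  let gap := (s.length : Int) + 1 - r.1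
  if gap > r.2 then gap else r.2

-- ===== PRECONDITION & SPEC =====
def Spec_func (args : String) (out : Int) : Prop := out = func_alt args
instance (args : String) (out : Int) : Decidable (Spec_func args out) := by unfold Spec_func; infer_instance

-- ===== CLAIM (what is proved, stated in full; the proofs are below) =====
def Claim_equal_func : Prop := ∀ (args : String), Dom_func args → Spec_func args (func args)

-- ===== LEMMAS AND PROOFS =====

-- max adjacent gap of a list, structurally
def pvAdj : List Int → Int → Int
  | [], m => m
  | [_], m => m
  | a :: b :: t, m => pvAdj (b :: t) (if b - a > m then b - a else m)

-- A's second (indexed) loop equals the structural adjacency scan.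
theorem pvAdj_loop (t : List Int) : ∀ (a : Int) (m : Int),
    (List.range t.length).foldl
      (fun m k =>
        if (a :: t).getD (k + 1) 0 - (a :: t).getD k 0 > m then
          (a :: t).getD (k + 1) 0 - (a :: t).getD k 0
        else m) m = pvAdj (a :: t) m := by
  induction t with
  | nil => intro a m; simp [pvAdj]
  | cons b t ih =>
    intro a m
    rw [List.length_cons, List.range_succ_eq_map, List.foldl_cons, List.foldl_map]
    simpa [pvAdj] using ih b _

-- B's streaming fold, related to pvAdj with an arbitrary continuation tail.
theorem pvB_fold (vowels : List Char) (cs : List Char) :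
    ∀ (s prev m : Int) (tail : List Int),
    pvAdj (prev :: ((PySem.List.enumerate cs s).filter (fun p => p.2 ∈ vowels)).map
        (fun p => p.1 + 1) ++ tail) m =
    pvAdj ((((PySem.List.enumerate cs s).foldl (fun (st : Int × Int) p =>
        if p.2 ∈ vowels then
          (p.1 + 1, if p.1 + 1 - st.1 > st.2 then p.1 + 1 - st.1 else st.2)
        else st) (prev, m)).1 :: tail))
      (((PySem.List.enumerate cs s).foldl (fun (st : Int × Int) p =>
        if p.2 ∈ vowels then
          (p.1 + 1, if p.1 + 1 - st.1 > st.2 then p.1 + 1 - st.1 else st.2)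
        else st) (prev, m)).2) := by
  induction cs with
  | nil => intro s prev m tail; simp [PySem.List.enumerate_nil]
  | cons c t ih =>
    intro s prev m tail
    rw [PySem.List.enumerate_cons]
    by_cases h : c ∈ vowels
    · simp only [List.filter_cons, List.foldl_cons, h, if_pos, decide_true]
      simpa [pvAdj] using ih (s + 1) (s + 1) (if s + 1 - prev > m then s + 1 - prev else m) tail
    · simp only [List.filter_cons, List.foldl_cons, h, decide_false]
      exact ih (s + 1) prev m tail

-- A's index-based second loop (over the real pyRange / pyGetD) equals pvAdj.
theorem loop_eq (a : Int) (l : List Int) (m : Int) :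
    (PySem.List.pyRange 0 (((a :: l).length : Int) - 1) 1).foldl
      (fun m i =>
        if PySem.List.pyGetD (a :: l) (i + 1) 0 - PySem.List.pyGetD (a :: l) i 0 > m then
          PySem.List.pyGetD (a :: l) (i + 1) 0 - PySem.List.pyGetD (a :: l) i 0
        else m) m = pvAdj (a :: l) m := by
  have h : (((a :: l).length : Int) - 1) = (l.length : Int) := by simp
  rw [h, PySem.List.pyRange_one, List.foldl_map]
  rw [← pvAdj_loop l a m]
  apply PySem.List.foldl_congr_mem
  intro m k hk
  have h0 : (0 : Int) + (k : Int) = (k : Int) := by ring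
  have h1 : ((k : Int) + 1) = (((k + 1 : Nat)) : Int) := by push_cast; ring
  rw [h0, h1, PySem.List.pyGetD_natCast, PySem.List.pyGetD_natCast]

-- A's first loop builds exactly [0] ++ (vowel positions + 1).
theorem firstloop_eq (cs : List Char) (list1 : List Char) :
    (PySem.List.pyRange 0 (cs.length : Int) 1).foldl
      (fun acc i => if PySem.List.pyGetD cs i ' ' ∈ list1 then acc ++ [i + 1] else acc) [0] =
    0 :: ((PySem.List.enumerate cs 0).filter (fun p => decide (p.2 ∈ list1))).map (fun p => p.1 + 1) := by
  calc (PySem.List.pyRange 0 (cs.length : Int) 1).foldl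
        (fun acc i => if PySem.List.pyGetD cs i ' ' ∈ list1 then acc ++ [i + 1] else acc) [0]
      = ((PySem.List.pyRange 0 (cs.length : Int) 1).map (fun j => (j, PySem.List.pyGetD cs j ' '))).foldl
        (fun acc (p : Int × Char) => if p.2 ∈ list1 then acc ++ [p.1 + 1] else acc) [0] := by
        rw [List.foldl_map]
    _ = (PySem.List.enumerate cs 0).foldl
        (fun acc (p : Int × Char) => if p.2 ∈ list1 then acc ++ [p.1 + 1] else acc) [0] := by
        rw [show ((cs.length : Int)) = PySem.List.len cs from (PySem.List.len_eq cs).symm,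
            ← PySem.List.enumerate_eq_map_pyRange cs ' ']
    _ = 0 :: ((PySem.List.enumerate cs 0).filter (fun p => decide (p.2 ∈ list1))).map (fun p => p.1 + 1) := by
        rw [PySem.List.foldl_append_ite (fun p : Int × Char => p.2 ∈ list1) (fun p => p.1 + 1)]
        rfl

-- ===== VERDICT (by name: the statement is the Claim_ definition above) =====
theorem func_spec : Claim_equal_func := by
  unfold Claim_equal_func Spec_func func func_alt
  intro args _
  simp only [firstloop_eq, List.cons_append]
  rw [loop_eq]
  refine (pvB_fold ['A','E','I','O','U','Y'] args.toList 0 0 0 [(args.toList.length : Int) + 1]).trans ?_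
  simp [pvAdj]
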